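-- pv_equiv track=rewrite | github.com/sanjana-shriram/SoundSync_Frontend | app/views.py | getSublist
-- ===== SOURCE A (Python) =====
-- def getSublist(midi_list, small_list):
--     ptr1, ptr2 = 0, 0
--     while ptr1 < len(small_list) and ptr2 < len(midi_list):
--         if small_list[ptr1] == midi_list[ptr2]:
--             ptr1 += 1
--             ptr2 += 1
--             if ptr1 >= len(small_list):
--                 return ptr2 - 1
--         else:
--             if ptr2 + 1 >= len(midi_list): return -1
--             ptr2 += 1
--     return -1
-- ===== SOURCE B (Python) =====
-- def getSublist(midi_list, small_list):
--     positions = {}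
--     for i, v in enumerate(midi_list):
--         positions[v] = positions.get(v, []) + [i]
--     last = -1
--     start = 0
--     for target in small_list:
--         ps = positions.get(target, [])
--         lo, hi = 0, len(ps)
--         while lo < hi:
--             mid = (lo + hi) // 2
--             if ps[mid] < start:
--                 lo = mid + 1
--             else:
--                 hi = mid
--         if lo == len(ps):
--             return -1
--         last = ps[lo]
--         start = last + 1
--     return last
-- ===== Notes on version B (the rewrite author's own statement) =====
-- stated objective: alternative
-- what changed: B first builds a dict mapping each value to its ascending list of positions in midi_list, then for each target binary-searches that position list for the first position at or after the moving cursor, instead of A's two-pointer element-by-element scan.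
import Mathlib
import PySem

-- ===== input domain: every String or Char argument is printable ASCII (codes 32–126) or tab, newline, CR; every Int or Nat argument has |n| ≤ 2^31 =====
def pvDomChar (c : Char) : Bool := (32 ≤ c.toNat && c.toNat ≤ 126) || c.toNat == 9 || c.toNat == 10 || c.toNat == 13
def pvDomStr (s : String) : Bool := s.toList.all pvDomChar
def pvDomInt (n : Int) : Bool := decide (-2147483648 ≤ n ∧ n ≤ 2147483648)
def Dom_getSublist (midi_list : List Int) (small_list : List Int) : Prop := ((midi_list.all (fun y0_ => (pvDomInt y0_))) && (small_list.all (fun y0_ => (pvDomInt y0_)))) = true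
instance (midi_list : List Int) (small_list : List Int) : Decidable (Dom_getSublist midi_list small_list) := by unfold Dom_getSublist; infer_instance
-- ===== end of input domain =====

-- B replaces A's two-pointer scan by a precomputed value -> ascending-positions
-- index of midi_list plus a hand-written binary search per target (alternative
-- algorithm, same return value).


-- ===== PORT A =====
-- A's while loop: state (ptr1, ptr2); each iteration increments ptr2, so it
-- terminates by midi_list.length - ptr2.  All indexing is guarded in range,
-- so xs[i]?.getD 0 is exact for Python's xs[i] here.
def getSublistAux (midi_list small_list : List Int) : Nat → Nat → Nat → Int
  | _, _, 0 => -1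
  | ptr1, ptr2, fuel + 1 =>
    if ptr1 < small_list.length ∧ ptr2 < midi_list.length then
      if small_list[ptr1]?.getD 0 = midi_list[ptr2]?.getD 0 then
        if small_list.length ≤ ptr1 + 1 then ((ptr2 : Int) + 1) - 1
        else getSublistAux midi_list small_list (ptr1 + 1) (ptr2 + 1) fuel
      else
        if midi_list.length ≤ ptr2 + 1 then -1
        else getSublistAux midi_list small_list ptr1 (ptr2 + 1) fuel
    else -1

def getSublist (midi_list : List Int) (small_list : List Int) : Int :=
  getSublistAux midi_list small_list 0 0 midi_list.length

-- ===== PORT B =====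
-- B's first pass: positions[v] = positions.get(v, []) + [i] over enumerate(midi_list).
def buildPos (midi_list : List Int) : PySem.Dict Int (List Int) :=
  ((PySem.List.enumerate midi_list).map (fun p => (p.2, p.1))).foldl
    (fun d p => d.modify p.1 [] (· ++ [p.2])) PySem.Dict.empty

-- B's inner while loop (binary search for the first element ≥ st); indices are
-- always in range, so ps[mid]?.getD 0 is exact for Python's ps[mid].
def lowerBound (ps : List Int) (st : Int) : Nat → Nat → Nat → Nat
  | lo, _, 0 => lo
  | lo, hi, fuel + 1 =>
    if lo < hi then
      let mid := (lo + hi) / 2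
      if ps[mid]?.getD 0 < st then lowerBound ps st (mid + 1) hi fuel
      else lowerBound ps st lo mid fuel
    else lo

-- B's for loop with early return: Option-carried state (last, start); none = returned -1.
def getSublist_alt (midi_list : List Int) (small_list : List Int) : Int :=
  let positions := buildPos midi_list
  (small_list.foldl
    (fun st target =>
      match st with
      | none => none
      | some (_, start) =>
        let ps := positions.getD target []
        let lo := lowerBound ps start 0 ps.length ps.length
        if lo = ps.length then none
        else some (ps[lo]?.getD 0, ps[lo]?.getD 0 + 1))
    (some ((-1 : Int), (0 : Int)))).elim (-1) Prod.fst

-- ===== PRECONDITION & SPEC =====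
def Spec_getSublist (midi_list : List Int) (small_list : List Int) (out : Int) : Prop := out = getSublist_alt midi_list small_list
instance (midi_list : List Int) (small_list : List Int) (out : Int) : Decidable (Spec_getSublist midi_list small_list out) := by unfold Spec_getSublist; infer_instance

-- ===== CLAIM (what is proved, stated in full; the proofs are below) =====
def Claim_equal_getSublist : Prop := ∀ (midi_list : List Int) (small_list : List Int), Dom_getSublist midi_list small_list → Spec_getSublist midi_list small_list (getSublist midi_list small_list)

-- ===== LEMMAS AND PROOFS =====

-- first index j ≥ i with midi[j] = t (shared characterisation of both loops)
def indexFrom (xs : List Int) (t : Int) (i : Nat) : Option Nat :=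
  if i < xs.length then
    if xs[i]?.getD 0 = t then some i else indexFrom xs t (i + 1)
  else none
termination_by xs.length - i
decreasing_by omega

-- recursive reading of a greedy left-to-right matching loop
def loopB (midi targets : List Int) (start : Nat) (last : Int) : Int :=
  match targets with
  | [] => last
  | t :: ts =>
    match indexFrom midi t start with
    | none => -1
    | some j => loopB midi ts (j + 1) (j : Int)

-- ---------- A's loop equals loopB ----------

theorem aux_fuel_irrel (midi small : List Int) :
    ∀ fuel fuel' ptr1 ptr2 : Nat, midi.length - ptr2 ≤ fuel → midi.length - ptr2 ≤ fuel' →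
    getSublistAux midi small ptr1 ptr2 fuel = getSublistAux midi small ptr1 ptr2 fuel' := by
  intro fuel
  induction fuel with
  | zero =>
    intro fuel' ptr1 ptr2 hf hf'
    cases fuel' with
    | zero => rfl
    | succ f' =>
      show (-1 : Int) = getSublistAux midi small ptr1 ptr2 (f' + 1)
      rw [getSublistAux, if_neg (by omega : ¬(ptr1 < small.length ∧ ptr2 < midi.length))]
  | succ f ih =>
    intro fuel' ptr1 ptr2 hf hf'
    cases fuel' with
    | zero =>
      show getSublistAux midi small ptr1 ptr2 (f + 1) = (-1 : Int)
      rw [getSublistAux, if_neg (by omega : ¬(ptr1 < small.length ∧ ptr2 < midi.length))]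
    | succ f' =>
      rw [getSublistAux, getSublistAux]
      by_cases hc : ptr1 < small.length ∧ ptr2 < midi.length
      · rw [if_pos hc, if_pos hc]
        split_ifs with hm hfin h3
        · rfl
        · exact ih f' (ptr1 + 1) (ptr2 + 1) (by omega) (by omega)
        · rfl
        · exact ih f' ptr1 (ptr2 + 1) (by omega) (by omega)
      · rw [if_neg hc, if_neg hc]

theorem aux_step (midi small : List Int) (ptr1 : Nat) (h1 : ptr1 < small.length) :
    ∀ fuel ptr2 : Nat, midi.length - ptr2 ≤ fuel →
    getSublistAux midi small ptr1 ptr2 fuel =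
      match indexFrom midi (small[ptr1]?.getD 0) ptr2 with
      | none => -1
      | some j =>
        if small.length ≤ ptr1 + 1 then ((j : Int) + 1) - 1
        else getSublistAux midi small (ptr1 + 1) (j + 1) midi.length := by
  intro fuel
  induction fuel with
  | zero =>
    intro ptr2 hf
    have hn : indexFrom midi (small[ptr1]?.getD 0) ptr2 = none := by
      rw [indexFrom, if_neg (by omega)]
    rw [hn]
    rfl
  | succ f ih =>
    intro ptr2 hf
    rw [getSublistAux, indexFrom]
    by_cases h2 : ptr2 < midi.length
    · by_cases hm : small[ptr1]?.getD 0 = midi[ptr2]?.getD 0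
      · rw [if_pos ⟨h1, h2⟩, if_pos hm, if_pos h2,
          if_pos (show midi[ptr2]?.getD 0 = small[ptr1]?.getD 0 from hm.symm)]
        show (if small.length ≤ ptr1 + 1 then ((ptr2 : Int) + 1) - 1
              else getSublistAux midi small (ptr1 + 1) (ptr2 + 1) f) =
            (if small.length ≤ ptr1 + 1 then ((ptr2 : Int) + 1) - 1
             else getSublistAux midi small (ptr1 + 1) (ptr2 + 1) midi.length)
        by_cases hfin : small.length ≤ ptr1 + 1
        · rw [if_pos hfin, if_pos hfin]
        · rw [if_neg hfin, if_neg hfin]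
          exact aux_fuel_irrel midi small f midi.length (ptr1 + 1) (ptr2 + 1) (by omega) (by omega)
      · rw [if_pos ⟨h1, h2⟩, if_neg hm, if_pos h2,
          if_neg (show ¬ midi[ptr2]?.getD 0 = small[ptr1]?.getD 0 from fun h => hm h.symm)]
        by_cases h3 : midi.length ≤ ptr2 + 1
        · have hn : indexFrom midi (small[ptr1]?.getD 0) (ptr2 + 1) = none := by
            rw [indexFrom, if_neg (by omega)]
          rw [if_pos h3, hn]
        · rw [if_neg h3, ih (ptr2 + 1) (by omega)]
    · rw [if_neg (by omega : ¬(ptr1 < small.length ∧ ptr2 < midi.length)), if_neg h2]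

theorem aux_eq_loopB (midi small : List Int) :
    ∀ ptr1 ptr2 : Nat, ptr1 < small.length →
    getSublistAux midi small ptr1 ptr2 midi.length =
      loopB midi (small.drop ptr1) ptr2 (-1) := by
  intro ptr1
  induction hd : small.length - ptr1 using Nat.strong_induction_on generalizing ptr1 with
  | _ d ih =>
    intro ptr2 h1
    have hdrop : small.drop ptr1 = small[ptr1] :: small.drop (ptr1 + 1) :=
      List.drop_eq_getElem_cons h1
    have hget : small[ptr1]?.getD 0 = small[ptr1] := by
      rw [List.getElem?_eq_getElem h1]; rfl
    rw [aux_step midi small ptr1 h1 midi.length ptr2 (by omega), hdrop, hget, loopB]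
    cases hi : indexFrom midi small[ptr1] ptr2 with
    | none => rfl
    | some j =>
      show (if small.length ≤ ptr1 + 1 then ((j : Int) + 1) - 1
            else getSublistAux midi small (ptr1 + 1) (j + 1) midi.length) =
          loopB midi (small.drop (ptr1 + 1)) (j + 1) (j : Int)
      by_cases hlast : small.length ≤ ptr1 + 1
      · have hnil : small.drop (ptr1 + 1) = [] := List.drop_eq_nil_of_le hlast
        rw [if_pos hlast, hnil, loopB]
        omega
      · have h1' : ptr1 + 1 < small.length := by omega
        have hdrop' : small.drop (ptr1 + 1) = small[ptr1 + 1] :: small.drop (ptr1 + 2) :=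
          List.drop_eq_getElem_cons h1'
        rw [if_neg hlast, ih (small.length - (ptr1 + 1)) (by omega) (ptr1 + 1) rfl (j + 1) h1',
          hdrop', loopB, loopB]

-- ---------- B's positions list ----------

-- positions of t in xs, counting from s
def posAbs : List Int → Int → Int → List Int
  | [], _, _ => []
  | x :: xs, t, s => if x = t then s :: posAbs xs t (s + 1) else posAbs xs t (s + 1)

theorem buildPos_getD (midi : List Int) (t : Int) :
    (buildPos midi).getD t [] = posAbs midi t 0 := by
  unfold buildPos
  rw [PySem.Dict.getD_foldl_modify_append]
  rw [PySem.Dict.getD_empty]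
  show ((((PySem.List.enumerate midi 0).map (fun p => (p.2, p.1))).filter
      (fun p => p.1 == t)).map (·.2)) = posAbs midi t 0
  have : ∀ (xs : List Int) (s : Int),
      ((((PySem.List.enumerate xs s).map (fun p => (p.2, p.1))).filter
        (fun p => p.1 == t)).map (·.2)) = posAbs xs t s := by
    intro xs
    induction xs with
    | nil => intro s; simp [PySem.List.enumerate_nil, posAbs]
    | cons x xs ih =>
      intro s
      rw [PySem.List.enumerate_cons]
      by_cases hx : x = t
      · simp [posAbs, hx, ih]
      · simp [posAbs, hx, ih]
  exact this midi 0

theorem posAbs_ge (xs : List Int) : ∀ (t s : Int) (y : Int), y ∈ posAbs xs t s → s ≤ y := by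
  induction xs with
  | nil => intro t s y h; simp [posAbs] at h
  | cons x xs ih =>
    intro t s y h
    unfold posAbs at h
    split_ifs at h with hx
    · rcases List.mem_cons.mp h with h | h
      · omega
      · have := ih t (s + 1) y h; omega
    · have := ih t (s + 1) y h; omega

theorem posAbs_pairwise (xs : List Int) : ∀ (t s : Int), (posAbs xs t s).Pairwise (· < ·) := by
  induction xs with
  | nil => intro t s; simp [posAbs]
  | cons x xs ih =>
    intro t s
    unfold posAbs
    split_ifs with hx
    · exact List.pairwise_cons.mpr ⟨fun y hy => by have := posAbs_ge xs t (s + 1) y hy; omega, ih t (s + 1)⟩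
    · exact ih t (s + 1)

-- find?-characterisation: first position ≥ s in posAbs = indexFrom
theorem find_posAbs (midi : List Int) (t : Int) (s : Nat) :
    ∀ i : Nat,
    (posAbs (midi.drop i) t (i : Int)).find? (fun p => decide ((s : Int) ≤ p)) =
      (indexFrom midi t (max i s)).map (fun n => (n : Int)) := by
  intro i
  induction hd : midi.length - i using Nat.strong_induction_on generalizing i with
  | _ d ih =>
    by_cases hi : i < midi.length
    · have hdrop : midi.drop i = midi[i] :: midi.drop (i + 1) := List.drop_eq_getElem_cons hi
      rw [hdrop]
      have hget : midi[i]?.getD 0 = midi[i] := by rw [List.getElem?_eq_getElem hi]; rfl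
      by_cases hx : midi[i] = t
      · rw [show posAbs (midi[i] :: midi.drop (i + 1)) t (i : Int) =
            (i : Int) :: posAbs (midi.drop (i + 1)) t ((i : Int) + 1) by
            simp only [posAbs]; rw [if_pos hx]]
        by_cases hs : s ≤ i
        · rw [List.find?_cons_of_pos (by simpa using (by exact_mod_cast hs : (s : Int) ≤ (i : Int)))]
          have : max i s = i := by omega
          rw [this, indexFrom, if_pos hi, if_pos (hget.trans hx)]
          simp
        · rw [List.find?_cons_of_neg (by simp; omega)]
          have hc : ((i : Int) + 1) = ((i + 1 : Nat) : Int) := by push_cast; ring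
          rw [hc, ih (midi.length - (i + 1)) (by omega) (i + 1) rfl]
          have hm : max (i + 1) s = max i s := by omega
          rw [hm]
      · rw [show posAbs (midi[i] :: midi.drop (i + 1)) t (i : Int) =
            posAbs (midi.drop (i + 1)) t ((i : Int) + 1) by
            simp only [posAbs]; rw [if_neg hx]]
        have hc : ((i : Int) + 1) = ((i + 1 : Nat) : Int) := by push_cast; ring
        rw [hc, ih (midi.length - (i + 1)) (by omega) (i + 1) rfl]
        by_cases hs : s ≤ i
        · have h1 : max i s = i := by omega
          have h2 : max (i + 1) s = i + 1 := by omega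
          rw [h1, h2]
          conv_rhs => rw [indexFrom]
          rw [if_pos hi, if_neg (fun h => hx (hget.symm.trans h))]
        · have : max (i + 1) s = max i s := by omega
          rw [this]
    · have hnil : midi.drop i = [] := List.drop_eq_nil_of_le (by omega)
      rw [hnil]
      show ([] : List Int).find? _ = _
      rw [List.find?_nil, indexFrom, if_neg (by omega)]
      rfl

-- ---------- binary search ----------

theorem lowerBound_spec (ps : List Int) (st : Int) (hps : ps.Pairwise (· < ·)) :
    ∀ (fuel : Nat) (lo hi : Nat), hi - lo ≤ fuel → lo ≤ hi → hi ≤ ps.length →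
    (∀ k : Nat, k < lo → (h : k < ps.length) → ps[k] < st) →
    (∀ k : Nat, hi ≤ k → (h : k < ps.length) → st ≤ ps[k]) →
    (lowerBound ps st lo hi fuel ≤ ps.length ∧
     (∀ k : Nat, k < lowerBound ps st lo hi fuel → (h : k < ps.length) → ps[k] < st) ∧
     ((h : lowerBound ps st lo hi fuel < ps.length) → st ≤ ps[lowerBound ps st lo hi fuel])) := by
  intro fuel
  induction fuel with
  | zero =>
    intro lo hi hf hlohi hhi hlow hhigh
    show (lo ≤ ps.length ∧ _ ∧ _)
    exact ⟨by omega, hlow, fun hl => hhigh lo (by omega) hl⟩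
  | succ f ih =>
    intro lo hi hf hlohi hhi hlow hhigh
    rw [lowerBound]
    by_cases h : lo < hi
    · rw [if_pos h]
      have hmid : (lo + hi) / 2 < ps.length := by omega
      have hget : ps[(lo + hi) / 2]?.getD 0 = ps[(lo + hi) / 2] := by
        rw [List.getElem?_eq_getElem hmid]; rfl
      have hsorted := List.pairwise_iff_getElem.mp hps
      by_cases hc : ps[(lo + hi) / 2]?.getD 0 < st
      · rw [if_pos hc]
        refine ih ((lo + hi) / 2 + 1) hi (by omega) (by omega) hhi ?_ hhigh
        intro k hk hkl
        rcases Nat.lt_or_ge k ((lo + hi) / 2) with hk' | hk'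
        · calc ps[k] < ps[(lo + hi) / 2] := hsorted k ((lo + hi) / 2) hkl hmid hk'
            _ < st := by rwa [hget] at hc
        · have : k = (lo + hi) / 2 := by omega
          subst this; rwa [hget] at hc
      · rw [if_neg hc]
        refine ih lo ((lo + hi) / 2) (by omega) (by omega) (by omega) hlow ?_
        intro k hk hkl
        rcases Nat.lt_or_ge ((lo + hi) / 2) k with hk' | hk'
        · have h1 : st ≤ ps[(lo + hi) / 2] := by rw [← hget]; omega
          have h2 : ps[(lo + hi) / 2] < ps[k] := hsorted ((lo + hi) / 2) k hmid hkl hk'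
          omega
        · have : k = (lo + hi) / 2 := by omega
          subst this; rw [← hget]; omega
    · rw [if_neg h]
      exact ⟨by omega, hlow, fun hl => hhigh lo (by omega) hl⟩

theorem find_of_lowerBound (ps : List Int) (st : Int) (r : Nat)
    (hr : r ≤ ps.length)
    (hlt : ∀ k : Nat, k < r → (h : k < ps.length) → ps[k] < st)
    (hge : (h : r < ps.length) → st ≤ ps[r]) :
    ps.find? (fun p => decide (st ≤ p)) = if h : r = ps.length then none else some ps[r] := by
  induction ps generalizing r with
  | nil =>
    have : r = 0 := by simp at hr; omega
    subst this; simp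
  | cons x xs ih =>
    cases r with
    | zero =>
      have : st ≤ x := hge (by simp)
      rw [List.find?_cons_of_pos (by simpa using this)]
      rw [dif_neg (by simp)]
      rfl
    | succ r' =>
      have hx : x < st := hlt 0 (by omega) (by simp)
      rw [List.find?_cons_of_neg (by simp; omega)]
      have := ih r' (by simpa using hr)
        (fun k hk h => by simpa using hlt (k + 1) (by omega) (by simpa using h))
        (fun h => by simpa using hge (by simpa using h))
      rw [this]
      by_cases hre : r' = xs.length
      · rw [dif_pos hre, dif_pos (by simp [hre])]
      · rw [dif_neg hre, dif_neg (by simp [hre])]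
        simp

-- combined: B's per-target step computes indexFrom
theorem stepB_eq (midi : List Int) (t : Int) (s : Nat) (ps : List Int)
    (hpsdef : ps = (buildPos midi).getD t []) :
    (if lowerBound ps (s : Int) 0 ps.length ps.length = ps.length then (none : Option Int)
     else some (ps[lowerBound ps (s : Int) 0 ps.length ps.length]?.getD 0)) =
    (indexFrom midi t s).map (fun n => (n : Int)) := by
  have hps : ps = posAbs midi t 0 := by rw [hpsdef]; exact buildPos_getD midi t
  have hsorted : ps.Pairwise (· < ·) := by rw [hps]; exact posAbs_pairwise midi t 0
  obtain ⟨hr, hlt, hge⟩ := lowerBound_spec ps ((s : Nat) : Int) hsorted ps.length 0 ps.length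
    (by omega) (by omega) le_rfl (by omega) (by omega)
  have hfind := find_of_lowerBound ps ((s : Nat) : Int) _ hr hlt hge
  have hfind2 : ps.find? (fun p => decide ((s : Int) ≤ p)) =
      (indexFrom midi t (max 0 s)).map (fun n => (n : Int)) := by
    rw [hps]
    have := find_posAbs midi t s 0
    simpa using this
  rw [Nat.max_eq_right (Nat.zero_le s)] at hfind2
  rw [← hfind2, hfind]
  by_cases he : lowerBound ps ((s : Nat) : Int) 0 ps.length ps.length = ps.length
  · rw [if_pos he, dif_pos he]
  · rw [if_neg he, dif_neg he]
    have hl : lowerBound ps ((s : Nat) : Int) 0 ps.length ps.length < ps.length := by omega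
    rw [List.getElem?_eq_getElem hl]
    rfl

-- ---------- B's fold equals loopB ----------

theorem foldB_none (midi : List Int) (targets : List Int) :
    (targets.foldl
      (fun st target =>
        match st with
        | none => none
        | some (_, start) =>
          if lowerBound ((buildPos midi).getD target []) start 0 ((buildPos midi).getD target []).length ((buildPos midi).getD target []).length = ((buildPos midi).getD target []).length then none
          else some (((buildPos midi).getD target [])[lowerBound ((buildPos midi).getD target []) start 0 ((buildPos midi).getD target []).length ((buildPos midi).getD target []).length]?.getD 0, ((buildPos midi).getD target [])[lowerBound ((buildPos midi).getD target []) start 0 ((buildPos midi).getD target []).length ((buildPos midi).getD target []).length]?.getD 0 + 1))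
      (none : Option (Int × Int))) = none := by
  induction targets with
  | nil => rfl
  | cons t ts ih => simpa using ih

theorem foldB_eq_loopB (midi : List Int) (targets : List Int) :
    ∀ (s : Nat) (last : Int),
    ((targets.foldl
      (fun st target =>
        match st with
        | none => none
        | some (_, start) =>
          if lowerBound ((buildPos midi).getD target []) start 0 ((buildPos midi).getD target []).length ((buildPos midi).getD target []).length = ((buildPos midi).getD target []).length then none
          else some (((buildPos midi).getD target [])[lowerBound ((buildPos midi).getD target []) start 0 ((buildPos midi).getD target []).length ((buildPos midi).getD target []).length]?.getD 0, ((buildPos midi).getD target [])[lowerBound ((buildPos midi).getD target []) start 0 ((buildPos midi).getD target []).length ((buildPos midi).getD target []).length]?.getD 0 + 1))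
      (some (last, ((s : Nat) : Int)))).elim (-1) Prod.fst) = loopB midi targets s last := by
  induction targets with
  | nil => intro s last; rfl
  | cons t ts ih =>
    intro s last
    simp only [List.foldl_cons, loopB]
    have hstep := stepB_eq midi t s ((buildPos midi).getD t []) rfl
    cases hi : indexFrom midi t s with
    | none =>
      rw [hi] at hstep
      have hstep' : _ = (none : Option Int) := hstep.trans rfl
      by_cases hc : lowerBound ((buildPos midi).getD t []) ((s : Nat) : Int) 0
          ((buildPos midi).getD t []).length ((buildPos midi).getD t []).length = ((buildPos midi).getD t []).length
      · rw [if_pos hc, foldB_none midi ts]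
        rfl
      · rw [if_neg hc] at hstep'
        exact absurd hstep' (Option.some_ne_none _)
    | some j =>
      rw [hi] at hstep
      have hstep' : _ = some ((j : Nat) : Int) := hstep.trans rfl
      by_cases hc : lowerBound ((buildPos midi).getD t []) ((s : Nat) : Int) 0
          ((buildPos midi).getD t []).length ((buildPos midi).getD t []).length = ((buildPos midi).getD t []).length
      · rw [if_pos hc] at hstep'
        simp at hstep'
      · rw [if_neg hc] at hstep'
        rw [if_neg hc]
        have hval := Option.some.inj hstep'
        rw [hval]
        have hcast : ((j : Int) + 1) = (((j + 1 : Nat)) : Int) := by push_cast; ring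
        rw [hcast, ih (j + 1) (j : Int)]

theorem alt_eq_loopB (midi small : List Int) :
    getSublist_alt midi small = loopB midi small 0 (-1) := by
  have h := foldB_eq_loopB midi small 0 (-1)
  simp only [Nat.cast_zero] at h
  exact h

-- ===== VERDICT (by name: the statement is the Claim_ definition above) =====
theorem getSublist_spec : Claim_equal_getSublist := by
  intro midi small _
  unfold Spec_getSublist
  rw [alt_eq_loopB]
  cases small with
  | nil =>
    show getSublistAux midi [] 0 0 midi.length = loopB midi [] 0 (-1)
    cases h : midi.length with
    | zero => rfl
    | succ n =>
      rw [getSublistAux, if_neg (by simp)]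
      rfl
  | cons t ts =>
    unfold getSublist
    have := aux_eq_loopB midi (t :: ts) 0 0 (by simp)
    simpa using this
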